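-- pv_equiv track=rewrite | github.com/sincerity1129/codetest | day25/level5.py | solution
-- ===== SOURCE A (Python) =====
-- def solution(rows, columns, queries):
--     '''
--     row*columns(행렬) -> 직사각형
--     시계방향으로 회전(x1,y1,x2,y2) 한칸씩 회전
--     위치가 바뀐 숫자들 중 가장 작은 숫자들을 순서대로 배열
--
--     제한사항
--     rows 길이 -> 2 ~ 100
--     columns -> 2 ~ 100
--     queries의 회전 개수 -> 1 ~ 일만
--
--     예시
--      1  2  3  4  5  6
--      7  8  9 10 11 12
--     13 14 15 16 17 18
--     19 20 21 22 23 24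
--     25 26 27 28 29 30
--     31 32 33 34 35 36
--
--     (2,2,5,4) -> (2,2) (5,4)
--     8이 (2,2) // 22이 (5,4)
--     (2,2) -> (2,3) -> (2,4) -> (3,4) -> (4,4) -> (5,4) ->
--     (5,3) -> (5,2) -> (4,2) -> (3,2) -> (2,2)
--     풀이 과정
--     1. 이동해야하는 위치 변경
--       1) 동일한 x축에서 y축으로 +1만큼 이동
--       2) 동일한 y축에서 x축으로 +1만큼 이동
--       3) 동일한 x축에서 y축으로 -1만큼 이동
--       4) 동일한 y축에서 x축으로 -1만큼 이동
--     2. 이동한 위치에 있는 숫자를 리스트로 담아서 min 값 추출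
--     3. 이걸 지속 반복하면 됨
--     4. 리스트 쓰기보다는 딕셔너리로 좌표 값을 키로 해서 값 넣기
--     '''
--     matrix={}
--     value = 1
--     for x in range(rows):
--         for y in range(columns):
--             matrix[(x+1, y+1)] = value
--             value+=1
--
--
--     answer = []
--     for coordinate in queries:
--         min_num = 1000000
--         x1,y1,x2,y2 = coordinate[0], coordinate[1], coordinate[2], coordinate[3]
--         for y_add in range(y1, y2):
--             if y_add == y1:
--                 matrix["now_change_num"] = matrix[(x1, y_add)]
--             matrix["after_change_num"] = matrix[(x1, y_add+1)]
--             matrix[(x1, y_add+1)] = matrix["now_change_num"]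
--             min_num = min(min_num, matrix[(x1, y_add+1)])
--             matrix["now_change_num"] = matrix["after_change_num"]
--
--         for x_add in range(x1, x2):
--             matrix["after_change_num"] = matrix[(x_add+1, y2)]
--             matrix[(x_add+1, y2)] = matrix["now_change_num"]
--             min_num = min(min_num, matrix[(x_add+1, y2)])
--             matrix["now_change_num"] = matrix["after_change_num"]
--
--         for y_sub in range(y2, y1, -1):
--             matrix["after_change_num"] = matrix[(x2, y_sub-1)]
--             matrix[(x2, y_sub-1)] = matrix["now_change_num"]
--             min_num = min(min_num, matrix[(x2, y_sub-1)])
--             matrix["now_change_num"] = matrix["after_change_num"]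
--
--         for x_sub in range(x2, x1, -1):
--             matrix["after_change_num"] = matrix[(x_sub-1, y1)]
--             matrix[(x_sub-1, y1)] = matrix["now_change_num"]
--             min_num = min(min_num, matrix[(x_sub-1, y1)])
--             matrix["now_change_num"] = matrix["after_change_num"]
--
--         answer.append(min_num)
--     return answer
-- ===== SOURCE B (Python) =====
-- def solution(rows, columns, queries):
--     # Gather each ring clockwise, rotate the whole list by one, write it back;
--     # min taken once over the gathered values with A's 1000000 sentinel.
--     grid = [[r * columns + c + 1 for c in range(columns)] for r in range(rows)]
--     answer = []
--     for q in queries: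
--         x1, y1, x2, y2 = q[0], q[1], q[2], q[3]
--         ring = ([(x1, y) for y in range(y1, y2 + 1)]
--                 + [(x, y2) for x in range(x1 + 1, x2 + 1)]
--                 + [(x2, y) for y in range(y2 - 1, y1 - 1, -1)]
--                 + [(x, y1) for x in range(x2 - 1, x1, -1)])
--         vals = [grid[x - 1][y - 1] for (x, y) in ring]
--         rotated = [vals[-1]] + vals[:-1]
--         for (x, y), v in zip(ring, rotated):
--             grid[x - 1][y - 1] = v
--         answer.append(min([1000000] + vals))
--     return answer
-- ===== Notes on version B (the rewrite author's own statement) =====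
-- stated objective: simpler
-- what changed: A builds the matrix as a dict with a running counter and rotates each ring by threading a single carry value (held under scratch dict keys) through four separate shift loops, minimising write-by-write; B keeps a list-of-lists grid with closed-form initial values, gathers each ring's cells clockwise into one list, rotates that list by one with slicing, writes it back in one pass, and takes a single min over the gathered values with A's 1000000 sentinel.
-- outside the precondition, e.g. on solution(2, 2, [[1, 1, 1, 1]]): A returns [1000000], B returns [1]; on solution(2, 3, [[1, 1, 1, 3]]): A returns [1], B returns [1]; on solution(3, 3, [[1, 1, 3, 1]]): A raises KeyError, B returns [1]
import Mathlib
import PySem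

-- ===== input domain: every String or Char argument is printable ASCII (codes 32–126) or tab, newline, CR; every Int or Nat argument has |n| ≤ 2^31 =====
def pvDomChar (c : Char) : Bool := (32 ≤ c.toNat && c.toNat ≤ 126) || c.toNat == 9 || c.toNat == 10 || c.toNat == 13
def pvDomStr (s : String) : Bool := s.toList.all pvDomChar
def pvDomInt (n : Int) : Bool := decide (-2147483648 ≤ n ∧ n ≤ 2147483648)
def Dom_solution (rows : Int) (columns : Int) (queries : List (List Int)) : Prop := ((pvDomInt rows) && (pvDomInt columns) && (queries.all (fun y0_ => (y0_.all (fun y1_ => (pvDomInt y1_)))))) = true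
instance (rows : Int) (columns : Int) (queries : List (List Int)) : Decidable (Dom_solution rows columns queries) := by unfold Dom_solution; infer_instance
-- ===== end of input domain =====

-- B rewrites A's four carry-threading shift loops as gather-ring / rotate-by-one / write-back
-- with a single sentinel min (objective: simpler decomposition; same asymptotic cost).

-- ===== PORT A =====
-- A stores its two scratch variables under the string keys "now_change_num"/"after_change_num"
-- in the same dict as the (Int×Int) coordinate keys; since the key spaces are disjoint the port
-- threads them as two Int components (now, after) of the fold state — exact for every lookup.

/-- the shared body of A's four shift loops (`key t` is the written coordinate):
    after = matrix[key]; matrix[key] = now; min_num = min(min_num, matrix[key]); now = after -/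
def aBody (key : Int → Int × Int) (s : PySem.Dict (Int × Int) Int × Int × Int × Int) (t : Int) :
    PySem.Dict (Int × Int) Int × Int × Int × Int :=
  let after := s.1.getD (key t) 0
  let d := s.1.insert (key t) s.2.1
  let mn := min s.2.2.2 (d.getD (key t) 0)
  (d, after, after, mn)

/-- first loop's body: `if y_add == y1: matrix["now_change_num"] = matrix[(x1, y_add)]` then the shared body -/
def aBody1 (x1 y1 : Int) (s : PySem.Dict (Int × Int) Int × Int × Int × Int) (y_add : Int) :
    PySem.Dict (Int × Int) Int × Int × Int × Int :=
  let s := if y_add = y1 then (s.1, s.1.getD (x1, y_add) 0, s.2.2.1, s.2.2.2) else s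
  aBody (fun y => (x1, y + 1)) s y_add

/-- matrix = {}; value = 1; for x in range(rows): for y in range(columns): matrix[(x+1,y+1)] = value; value += 1 -/
def buildMatrix (rows columns : Int) : PySem.Dict (Int × Int) Int :=
  ((PySem.List.pyRange 0 rows 1).foldl (fun (st : PySem.Dict (Int × Int) Int × Int) x =>
      (PySem.List.pyRange 0 columns 1).foldl (fun st y =>
        (st.1.insert (x + 1, y + 1) st.2, st.2 + 1)) st)
    (PySem.Dict.empty, 1)).1

def aQuery (st : PySem.Dict (Int × Int) Int × Int × Int × List Int) (coordinate : List Int) :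
    PySem.Dict (Int × Int) Int × Int × Int × List Int :=
  let d := st.1
  let x1 := PySem.List.pyGetD coordinate 0 0
  let y1 := PySem.List.pyGetD coordinate 1 0
  let x2 := PySem.List.pyGetD coordinate 2 0
  let y2 := PySem.List.pyGetD coordinate 3 0
  let s1 := (PySem.List.pyRange y1 y2 1).foldl (aBody1 x1 y1) (d, st.2.1, st.2.2.1, 1000000)
  let s2 := (PySem.List.pyRange x1 x2 1).foldl (aBody (fun x => (x + 1, y2))) s1
  let s3 := (PySem.List.pyRange y2 y1 (-1)).foldl (aBody (fun y => (x2, y - 1))) s2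
  let s4 := (PySem.List.pyRange x2 x1 (-1)).foldl (aBody (fun x => (x - 1, y1))) s3
  (s4.1, s4.2.1, s4.2.2.1, st.2.2.2 ++ [s4.2.2.2])

def solution (rows : Int) (columns : Int) (queries : List (List Int)) : List Int :=
  (queries.foldl aQuery (buildMatrix rows columns, 0, 0, [])).2.2.2

-- ===== PORT B =====
/-- grid[p[0]-1][p[1]-1] (in range under Pre_) -/
def gridGet (g : List (List Int)) (p : Int × Int) : Int :=
  PySem.List.pyGetD (PySem.List.pyGetD g (p.1 - 1) []) (p.2 - 1) 0

/-- grid[p[0]-1][p[1]-1] = v (in range under Pre_) -/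
def gridSet (g : List (List Int)) (p : Int × Int) (v : Int) : List (List Int) :=
  PySem.List.pySetD g (p.1 - 1)
    (PySem.List.pySetD (PySem.List.pyGetD g (p.1 - 1) []) (p.2 - 1) v)

def bQuery (st : List (List Int) × List Int) (q : List Int) : List (List Int) × List Int :=
  let g := st.1
  let x1 := PySem.List.pyGetD q 0 0
  let y1 := PySem.List.pyGetD q 1 0
  let x2 := PySem.List.pyGetD q 2 0
  let y2 := PySem.List.pyGetD q 3 0
  let ring := (PySem.List.pyRange y1 (y2 + 1) 1).map (fun y => (x1, y))
    ++ (PySem.List.pyRange (x1 + 1) (x2 + 1) 1).map (fun x => (x, y2))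
    ++ (PySem.List.pyRange (y2 - 1) (y1 - 1) (-1)).map (fun y => (x2, y))
    ++ (PySem.List.pyRange (x2 - 1) x1 (-1)).map (fun x => (x, y1))
  let vals := ring.map (fun p => gridGet g p)
  let rotated := PySem.List.pyGetD vals (-1) 0 :: PySem.List.slice vals none (some (-1))
  let g := (ring.zip rotated).foldl (fun g pv => gridSet g pv.1 pv.2) g
  (g, st.2 ++ [(PySem.List.min? ((1000000 : Int) :: vals) (fun x => x)).getD 0])

def solution_alt (rows : Int) (columns : Int) (queries : List (List Int)) : List Int :=
  (queries.foldl bQuery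
    ((PySem.List.pyRange 0 rows 1).map (fun r =>
      (PySem.List.pyRange 0 columns 1).map (fun c => r * columns + c + 1)), [])).2

-- ===== PRECONDITION & SPEC =====
-- Pre_ is the problem's own contract (each query a proper sub-rectangle 1 ≤ x1 < x2 ≤ rows,
-- 1 ≤ y1 < y2 ≤ columns, given as at least 4 ints).  Outside it A raises KeyError/IndexError,
-- except on degenerate queries (x1 = x2 or y1 = y2) where what A returns — when it returns at
-- all — depends on scratch state left over from earlier queries; that corner is excluded too.
def Pre_solution (rows : Int) (columns : Int) (queries : List (List Int)) : Prop :=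
  ∀ q ∈ queries, 4 ≤ q.length ∧
    1 ≤ q.getD 0 0 ∧ q.getD 0 0 < q.getD 2 0 ∧ q.getD 2 0 ≤ rows ∧
    1 ≤ q.getD 1 0 ∧ q.getD 1 0 < q.getD 3 0 ∧ q.getD 3 0 ≤ columns
instance (rows : Int) (columns : Int) (queries : List (List Int)) : Decidable (Pre_solution rows columns queries) := by unfold Pre_solution; infer_instance
def pvWitness_solution : Int × Int × List (List Int) := (2, 2, [[1, 1, 2, 2]])

def Spec_solution (rows : Int) (columns : Int) (queries : List (List Int)) (out : List Int) : Prop := out = solution_alt rows columns queries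
instance (rows : Int) (columns : Int) (queries : List (List Int)) (out : List Int) : Decidable (Spec_solution rows columns queries out) := by unfold Spec_solution; infer_instance

-- ===== CLAIM (what is proved, stated in full; the proofs are below) =====
def Claim_equal_solution : Prop := ∀ (rows : Int) (columns : Int) (queries : List (List Int)), Dom_solution rows columns queries → Pre_solution rows columns queries → Spec_solution rows columns queries (solution rows columns queries)

-- ===== LEMMAS AND PROOFS =====

/-- writeback: insert a list of (key, value) pairs in order -/
def wb (d : PySem.Dict (Int × Int) Int) (pairs : List ((Int × Int) × Int)) :
    PySem.Dict (Int × Int) Int :=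
  pairs.foldl (fun d pv => d.insert pv.1 pv.2) d

/-- A's carry-threading shift, abstracted over the list of written coordinates -/
def carry (d : PySem.Dict (Int × Int) Int) (now mn : Int) (ps : List (Int × Int)) :
    PySem.Dict (Int × Int) Int × Int × Int :=
  ps.foldl (fun s p => (s.1.insert p s.2.1, s.1.getD p 0, min s.2.2 s.2.1)) (d, now, mn)

/-- grid writeback on B's side -/
def wbG (g : List (List Int)) (pairs : List ((Int × Int) × Int)) : List (List Int) :=
  pairs.foldl (fun g pv => gridSet g pv.1 pv.2) g

def InRange (rows columns : Int) (p : Int × Int) : Prop :=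
  1 ≤ p.1 ∧ p.1 ≤ rows ∧ 1 ≤ p.2 ∧ p.2 ≤ columns

def GShape (rows columns : Int) (g : List (List Int)) : Prop :=
  g.length = rows.toNat ∧ ∀ row ∈ g, row.length = columns.toNat

def InvDG (rows columns : Int) (d : PySem.Dict (Int × Int) Int) (g : List (List Int)) : Prop :=
  ∀ p, InRange rows columns p → d.getD p 0 = gridGet g p

def ringL (x1 y1 x2 y2 : Int) : List (Int × Int) :=
  (PySem.List.pyRange y1 (y2 + 1) 1).map (fun y => (x1, y))
    ++ (PySem.List.pyRange (x1 + 1) (x2 + 1) 1).map (fun x => (x, y2))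
    ++ (PySem.List.pyRange (y2 - 1) (y1 - 1) (-1)).map (fun y => (x2, y))
    ++ (PySem.List.pyRange (x2 - 1) x1 (-1)).map (fun x => (x, y1))

def ringTail (x1 y1 x2 y2 : Int) : List (Int × Int) :=
  (PySem.List.pyRange (y1 + 1) (y2 + 1) 1).map (fun y => (x1, y))
    ++ (PySem.List.pyRange (x1 + 1) (x2 + 1) 1).map (fun x => (x, y2))
    ++ (PySem.List.pyRange (y2 - 1) (y1 - 1) (-1)).map (fun y => (x2, y))
    ++ (PySem.List.pyRange (x2 - 1) x1 (-1)).map (fun x => (x, y1))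

lemma ring_cons (x1 y1 x2 y2 : Int) (h : y1 < y2) :
    ringL x1 y1 x2 y2 = (x1, y1) :: ringTail x1 y1 x2 y2 := by
  unfold ringL ringTail
  rw [show PySem.List.pyRange y1 (y2 + 1) 1
      = y1 :: PySem.List.pyRange (y1 + 1) (y2 + 1) 1 from
    PySem.List.pyRange_one_cons (by omega)]
  simp

lemma mem_ring (x1 y1 x2 y2 : Int) (p : Int × Int) (hp : p ∈ ringL x1 y1 x2 y2) :
    (p.1 = x1 ∧ y1 ≤ p.2 ∧ p.2 ≤ y2) ∨ (p.2 = y2 ∧ x1 + 1 ≤ p.1 ∧ p.1 ≤ x2)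
    ∨ (p.1 = x2 ∧ y1 ≤ p.2 ∧ p.2 ≤ y2 - 1) ∨ (p.2 = y1 ∧ x1 + 1 ≤ p.1 ∧ p.1 ≤ x2 - 1) := by
  simp only [ringL, List.mem_append, List.mem_map] at hp
  rcases hp with ((⟨y, hy, rfl⟩ | ⟨x, hx, rfl⟩) | ⟨y, hy, rfl⟩) | ⟨x, hx, rfl⟩
  · rw [PySem.List.mem_pyRange_one] at hy
    exact Or.inl ⟨rfl, by omega, by omega⟩
  · rw [PySem.List.mem_pyRange_one] at hx
    exact Or.inr (Or.inl ⟨rfl, by omega, by omega⟩)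
  · rw [PySem.List.mem_pyRange_neg_one] at hy
    exact Or.inr (Or.inr (Or.inl ⟨rfl, by omega, by omega⟩))
  · rw [PySem.List.mem_pyRange_neg_one] at hx
    exact Or.inr (Or.inr (Or.inr ⟨rfl, by omega, by omega⟩))

lemma ring_inrange (rows columns x1 y1 x2 y2 : Int)
    (hx1 : 1 ≤ x1) (hx : x1 < x2) (hx2 : x2 ≤ rows)
    (hy1 : 1 ≤ y1) (hy : y1 < y2) (hy2 : y2 ≤ columns) :
    ∀ p ∈ ringL x1 y1 x2 y2, InRange rows columns p := by
  intro p hp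
  rcases mem_ring x1 y1 x2 y2 p hp with h | h | h | h <;>
    exact ⟨by omega, by omega, by omega, by omega⟩

lemma ring_nodup (x1 y1 x2 y2 : Int) (hx : x1 < x2) (hy : y1 < y2) :
    (ringL x1 y1 x2 y2).Nodup := by
  have inj1 : ∀ (x : Int), Function.Injective (fun y : Int => (x, y)) := by
    intro x a b h; exact ((Prod.mk.injEq _ _ _ _).mp h).2
  have inj2 : ∀ (y : Int), Function.Injective (fun x : Int => (x, y)) := by
    intro y a b h; exact ((Prod.mk.injEq _ _ _ _).mp h).1
  have ndr : ∀ (a b : Int), (PySem.List.pyRange a b (-1)).Nodup := by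
    intro a b
    rw [PySem.List.pyRange_neg_one_eq_reverse]
    exact List.nodup_reverse.mpr (PySem.List.nodup_pyRange_one _ _)
  have nd1 : ((PySem.List.pyRange y1 (y2 + 1) 1).map (fun y => (x1, y))).Nodup :=
    (PySem.List.nodup_pyRange_one _ _).map (inj1 x1)
  have nd2 : ((PySem.List.pyRange (x1 + 1) (x2 + 1) 1).map (fun x => (x, y2))).Nodup :=
    (PySem.List.nodup_pyRange_one _ _).map (inj2 y2)
  have nd3 : ((PySem.List.pyRange (y2 - 1) (y1 - 1) (-1)).map (fun y => (x2, y))).Nodup :=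
    (ndr _ _).map (inj1 x2)
  have nd4 : ((PySem.List.pyRange (x2 - 1) x1 (-1)).map (fun x => (x, y1))).Nodup :=
    (ndr _ _).map (inj2 y1)
  unfold ringL
  simp only [List.nodup_append]
  refine ⟨⟨⟨nd1, nd2, ?_⟩, nd3, ?_⟩, nd4, ?_⟩
  · intro a ha b hb
    simp only [List.mem_map] at ha hb
    obtain ⟨u, hu, rfl⟩ := ha
    obtain ⟨w, hw, rfl⟩ := hb
    simp only [PySem.List.mem_pyRange_one] at hu hw
    intro e; rw [Prod.mk.injEq] at e; omega
  · intro a ha b hb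
    simp only [List.mem_append, List.mem_map] at ha hb
    obtain ⟨w, hw, rfl⟩ := hb
    simp only [PySem.List.mem_pyRange_neg_one] at hw
    rcases ha with ⟨u, hu, rfl⟩ | ⟨u, hu, rfl⟩ <;>
      simp only [PySem.List.mem_pyRange_one] at hu <;>
      (intro e; rw [Prod.mk.injEq] at e; omega)
  · intro a ha b hb
    simp only [List.mem_append, List.mem_map, or_assoc] at ha hb
    obtain ⟨w, hw, rfl⟩ := hb
    simp only [PySem.List.mem_pyRange_neg_one] at hw
    rcases ha with ⟨u, hu, rfl⟩ | ⟨u, hu, rfl⟩ | ⟨u, hu, rfl⟩ <;>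
      simp only [PySem.List.mem_pyRange_one, PySem.List.mem_pyRange_neg_one] at hu <;>
      (intro e; rw [Prod.mk.injEq] at e; omega)

/-- A's four written-coordinate blocks form the ring rotated by one -/
lemma q_eq_ringTail (x1 y1 x2 y2 : Int) (hx : x1 < x2) (hy : y1 < y2) :
    (PySem.List.pyRange y1 y2 1).map (fun y => (x1, y + 1))
      ++ ((PySem.List.pyRange x1 x2 1).map (fun x => (x + 1, y2))
      ++ ((PySem.List.pyRange y2 y1 (-1)).map (fun y => (x2, y - 1))
      ++ (PySem.List.pyRange x2 x1 (-1)).map (fun x => (x - 1, y1))))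
    = ringTail x1 y1 x2 y2 ++ [(x1, y1)] := by
  have hb1 : (PySem.List.pyRange y1 y2 1).map (fun y => (x1, y + 1))
      = (PySem.List.pyRange (y1 + 1) (y2 + 1) 1).map (fun y => (x1, y)) := by
    rw [PySem.List.pyRange_one y1 y2, PySem.List.pyRange_one (y1 + 1) (y2 + 1),
      show y2 + 1 - (y1 + 1) = y2 - y1 from by ring]
    simp only [List.map_map]
    exact List.map_congr_left (fun k _ => by simp [Function.comp]; ring)
  have hb2 : (PySem.List.pyRange x1 x2 1).map (fun x => (x + 1, y2))
      = (PySem.List.pyRange (x1 + 1) (x2 + 1) 1).map (fun x => (x, y2)) := by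
    rw [PySem.List.pyRange_one x1 x2, PySem.List.pyRange_one (x1 + 1) (x2 + 1),
      show x2 + 1 - (x1 + 1) = x2 - x1 from by ring]
    simp only [List.map_map]
    exact List.map_congr_left (fun k _ => by simp [Function.comp]; ring)
  have hb3 : (PySem.List.pyRange y2 y1 (-1)).map (fun y => (x2, y - 1))
      = (PySem.List.pyRange (y2 - 1) (y1 - 1) (-1)).map (fun y => (x2, y)) := by
    rw [PySem.List.pyRange_neg_one y2 y1, PySem.List.pyRange_neg_one (y2 - 1) (y1 - 1),
      show y2 - 1 - (y1 - 1) = y2 - y1 from by ring]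
    simp only [List.map_map]
    exact List.map_congr_left (fun k _ => by simp [Function.comp]; ring)
  have hb4 : (PySem.List.pyRange x2 x1 (-1)).map (fun x => (x - 1, y1))
      = (PySem.List.pyRange (x2 - 1) x1 (-1)).map (fun x => (x, y1)) ++ [(x1, y1)] := by
    rw [PySem.List.pyRange_neg_one x2 x1, PySem.List.pyRange_neg_one (x2 - 1) x1,
      show (x2 - x1).toNat = (x2 - 1 - x1).toNat + 1 from by omega, List.range_succ]
    simp only [List.map_append, List.map_map]
    congr 1
    · exact List.map_congr_left (fun k _ => by simp [Function.comp]; ring)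
    · simp only [List.map_cons, List.map_nil, Function.comp]
      congr 2
      simp
      omega
  rw [hb1, hb2, hb3, hb4, ringTail]
  simp [List.append_assoc]

/-- one shift loop of A is `carry` over its written coordinates -/
lemma foldl_aBody (key : Int → Int × Int) : ∀ (l : List Int)
    (d : PySem.Dict (Int × Int) Int) (now after mn : Int),
    l.foldl (aBody key) (d, now, after, mn)
      = ((carry d now mn (l.map key)).1, (carry d now mn (l.map key)).2.1,
         (if l.isEmpty then after else (carry d now mn (l.map key)).2.1),
         (carry d now mn (l.map key)).2.2)
  | [], d, now, after, mn => by simp [carry]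
  | t :: l, d, now, after, mn => by
    have hb : aBody key (d, now, after, mn) t
        = (d.insert (key t) now, d.getD (key t) 0, d.getD (key t) 0, min mn now) := by
      simp [aBody, PySem.Dict.getD_insert_self]
    have hc : carry d now mn (key t :: l.map key)
        = carry (d.insert (key t) now) (d.getD (key t) 0) (min mn now) (l.map key) := by
      simp [carry]
    simp only [List.foldl_cons, List.map_cons, hb, hc,
      foldl_aBody key l (d.insert (key t) now) (d.getD (key t) 0) (d.getD (key t) 0) (min mn now)]
    cases l <;> simp [carry]

/-- the first loop: its first iteration loads `now` from the corner, the rest is uniform -/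
lemma foldl_aBody1 (x1 y1 y2 : Int) (h : y1 < y2)
    (d : PySem.Dict (Int × Int) Int) (now after mn : Int) :
    (PySem.List.pyRange y1 y2 1).foldl (aBody1 x1 y1) (d, now, after, mn)
      = (PySem.List.pyRange y1 y2 1).foldl (aBody (fun y => (x1, y + 1)))
          (d, d.getD (x1, y1) 0, after, mn) := by
  rw [show PySem.List.pyRange y1 y2 1 = y1 :: PySem.List.pyRange (y1 + 1) y2 1 from
    PySem.List.pyRange_one_cons h]
  simp only [List.foldl_cons]
  have h1 : aBody1 x1 y1 (d, now, after, mn)  y1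
      = aBody (fun y => (x1, y + 1)) (d, d.getD (x1, y1) 0, after, mn) y1 := by
    simp [aBody1]
  rw [h1]
  exact PySem.List.foldl_congr_mem _ _ _ _ (fun acc y hmem => by
    have : y ≠ y1 := by
      rw [PySem.List.mem_pyRange_one] at hmem
      omega
    simp [aBody1, this])

/-- carry over distinct coordinates = plain writeback of the shifted values; the min is over the written values -/
lemma carry_spec : ∀ (ps : List (Int × Int)) (d : PySem.Dict (Int × Int) Int) (now mn : Int),
    ps.Nodup →
    (carry d now mn ps).1
        = wb d (ps.zip ((now :: ps.map (fun p => d.getD p 0)).take ps.length))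
    ∧ (carry d now mn ps).2.2
        = List.foldl min mn ((now :: ps.map (fun p => d.getD p 0)).take ps.length)
  | [], d, now, mn, _ => by simp [carry, wb]
  | p :: t, d, now, mn, hnd => by
    have hp : p ∉ t := (List.nodup_cons.mp hnd).1
    have ht : t.Nodup := (List.nodup_cons.mp hnd).2
    have hstep : carry d now mn (p :: t)
        = carry (d.insert p now) (d.getD p 0) (min mn now) t := by
      simp [carry]
    have hmap : t.map (fun r => (d.insert p now).getD r 0) = t.map (fun r => d.getD r 0) := by
      refine List.map_congr_left (fun r hr => ?_)
      exact PySem.Dict.getD_insert_of_ne _ _ _ (fun e => hp (e ▸ hr))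
    obtain ⟨ih1, ih2⟩ := carry_spec t (d.insert p now) (d.getD p 0) (min mn now) ht
    rw [hmap] at ih1 ih2
    constructor
    · rw [hstep, ih1]
      simp [wb, List.take_succ_cons]
    · rw [hstep, ih2]
      simp [List.take_succ_cons]

lemma lookup_none : ∀ (l : List ((Int × Int) × Int)) (p : Int × Int),
    p ∉ l.map Prod.fst → l.lookup p = none
  | [], _, _ => rfl
  | (k, v) :: t, p, h => by
    simp only [List.map_cons, List.mem_cons] at h
    have h1 : (p == k) = false := beq_eq_false_iff_ne.mpr (fun e => h (Or.inl e))
    simp [List.lookup, h1, lookup_none t p (fun m => h (Or.inr m))]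

lemma wb_getD : ∀ (pairs : List ((Int × Int) × Int)) (d : PySem.Dict (Int × Int) Int),
    (pairs.map Prod.fst).Nodup → ∀ (p : Int × Int),
    (wb d pairs).getD p 0 = (pairs.lookup p).getD (d.getD p 0)
  | [], d, _, p => by simp [wb, List.lookup]
  | (k, v) :: rest, d, hnd, p => by
    simp only [List.map_cons, List.nodup_cons] at hnd
    have hw : wb d ((k, v) :: rest) = wb (d.insert k v) rest := by simp [wb]
    rw [hw, wb_getD rest (d.insert k v) hnd.2 p]
    by_cases hp : p = k
    · subst hp
      rw [lookup_none rest p hnd.1]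
      simp [List.lookup, PySem.Dict.getD_insert_self]
    · have h1 : (p == k) = false := beq_eq_false_iff_ne.mpr hp
      rw [PySem.Dict.getD_insert_of_ne _ _ _ hp]
      simp [List.lookup, h1]

lemma lookup_rotate (h : (Int × Int) × Int) (t : List ((Int × Int) × Int))
    (hh : h.1 ∉ t.map Prod.fst) (p : Int × Int) :
    (t ++ [h]).lookup p = (h :: t).lookup p := by
  obtain ⟨k, v⟩ := h
  rw [List.lookup_append]
  by_cases hp : p = k
  · subst hp; rw [lookup_none t p hh]; simp [List.lookup]
  · have h1 : (p == k) = false := beq_eq_false_iff_ne.mpr hp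
    simp [List.lookup, h1]

lemma gridGet_gridSet (rows columns : Int) (g : List (List Int)) (p : Int × Int) (v : Int)
    (hs : GShape rows columns g) (hp : InRange rows columns p)
    (q : Int × Int) (hq : InRange rows columns q) :
    gridGet (gridSet g p v) q = if q = p then v else gridGet g q := by
  obtain ⟨hp1, hp2, hp3, hp4⟩ := hp
  obtain ⟨hq1, hq2, hq3, hq4⟩ := hq
  have hxc : p.1 - 1 = ((p.1 - 1).toNat : Int) := by omega
  have hyc : p.2 - 1 = ((p.2 - 1).toNat : Int) := by omega
  have hqxc : q.1 - 1 = ((q.1 - 1).toNat : Int) := by omega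
  have hqyc : q.2 - 1 = ((q.2 - 1).toNat : Int) := by omega
  have hnx : (p.1 - 1).toNat < g.length := by rw [hs.1]; omega
  have hrow : PySem.List.pyGetD g (p.1 - 1) [] = g[(p.1 - 1).toNat] := by
    conv_lhs => rw [hxc]
    rw [PySem.List.pyGetD_natCast]
    exact List.getD_eq_getElem _ _ hnx
  have hrlen : (PySem.List.pyGetD g (p.1 - 1) []).length = columns.toNat := by
    rw [hrow]; exact hs.2 _ (List.getElem_mem hnx)
  unfold gridGet gridSet
  rw [hxc, hqxc, PySem.List.pyGetD_pySetD_natCast g _ _ _ [] hnx]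
  by_cases hx : (q.1 - 1).toNat = (p.1 - 1).toNat
  · rw [if_pos hx]
    have hny : (p.2 - 1).toNat < (PySem.List.pyGetD g (p.1 - 1) []).length := by
      rw [hrlen]; omega
    rw [← hxc, hyc, hqyc, PySem.List.pyGetD_pySetD_natCast _ _ _ _ 0 hny]
    by_cases hy : (q.2 - 1).toNat = (p.2 - 1).toNat
    · rw [if_pos hy, if_pos (show q = p from Prod.ext_iff.mpr (by constructor <;> omega))]
    · rw [if_neg hy, if_neg (by
        intro e; exact hy (by rw [e])), ← hqyc, hx, ← hxc]
  · rw [if_neg hx, if_neg (by intro e; exact hx (by rw [e])), ← hqxc]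

lemma gridSet_shape (rows columns : Int) (g : List (List Int)) (p : Int × Int) (v : Int)
    (hs : GShape rows columns g) (hp : InRange rows columns p) :
    GShape rows columns (gridSet g p v) := by
  obtain ⟨hp1, hp2, hp3, hp4⟩ := hp
  have hxc : p.1 - 1 = ((p.1 - 1).toNat : Int) := by omega
  have hnx : (p.1 - 1).toNat < g.length := by rw [hs.1]; omega
  constructor
  · rw [gridSet, PySem.List.length_pySetD, hs.1]
  · intro row hrow
    rw [gridSet, hxc, PySem.List.pySetD_natCast] at hrow
    rcases List.mem_or_eq_of_mem_set hrow with h | h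
    · exact hs.2 _ h
    · subst h
      rw [PySem.List.length_pySetD]
      rw [PySem.List.pyGetD_natCast, List.getD_eq_getElem _ _ hnx]
      exact hs.2 _ (List.getElem_mem hnx)

lemma wbG_shape (rows columns : Int) : ∀ (pairs : List ((Int × Int) × Int)) (g : List (List Int)),
    GShape rows columns g →
    (∀ pk ∈ pairs.map Prod.fst, InRange rows columns pk) →
    GShape rows columns (wbG g pairs)
  | [], g, hs, _ => hs
  | (k, v) :: rest, g, hs, hin => by
    have hw : wbG g ((k, v) :: rest) = wbG (gridSet g k v) rest := by simp [wbG]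
    rw [hw]
    exact wbG_shape rows columns rest _ (gridSet_shape rows columns g k v hs (hin k (by simp)))
      (fun pk hpk => hin pk (by simp at hpk ⊢; exact Or.inr hpk))

lemma wbG_getD (rows columns : Int) : ∀ (pairs : List ((Int × Int) × Int)) (g : List (List Int)),
    GShape rows columns g →
    (∀ pk ∈ pairs.map Prod.fst, InRange rows columns pk) →
    (pairs.map Prod.fst).Nodup →
    ∀ (q : Int × Int), InRange rows columns q →
    gridGet (wbG g pairs) q = (pairs.lookup q).getD (gridGet g q)
  | [], g, _, _, _, q, _ => by simp [wbG, List.lookup]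
  | (k, v) :: rest, g, hs, hin, hnd, q, hq => by
    simp only [List.map_cons, List.nodup_cons] at hnd
    have hk : InRange rows columns k := hin k (by simp)
    have hin' : ∀ pk ∈ rest.map Prod.fst, InRange rows columns pk :=
      fun pk hpk => hin pk (by simp at hpk ⊢; exact Or.inr hpk)
    have hw : wbG g ((k, v) :: rest) = wbG (gridSet g k v) rest := by simp [wbG]
    rw [hw, wbG_getD rows columns rest (gridSet g k v) (gridSet_shape rows columns g k v hs hk) hin' hnd.2 q hq]
    rw [gridGet_gridSet rows columns g k v hs hk q hq]
    by_cases hp : q = k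
    · subst hp
      rw [lookup_none rest q hnd.1, if_pos rfl]
      simp [List.lookup]
    · have h1 : (q == k) = false := beq_eq_false_iff_ne.mpr hp
      rw [if_neg hp]
      simp [List.lookup, h1]

lemma pyRange_zero_toNat (c : Int) :
    PySem.List.pyRange 0 c 1 = PySem.List.pyRange 0 (c.toNat : Int) 1 := by
  by_cases h : 0 ≤ c
  · rw [Int.toNat_of_nonneg h]
  · rw [PySem.List.pyRange_one_eq_nil (by omega), PySem.List.pyRange_one_eq_nil (by omega)]

lemma innerB (columns x : Int) : ∀ (n : Nat) (d : PySem.Dict (Int × Int) Int) (v : Int),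
    ((PySem.List.pyRange 0 (n : Int) 1).foldl
        (fun st y => (st.1.insert (x + 1, y + 1) st.2, st.2 + 1)) (d, v)).2 = v + n
    ∧ ∀ q : Int × Int,
      ((PySem.List.pyRange 0 (n : Int) 1).foldl
          (fun st y => (st.1.insert (x + 1, y + 1) st.2, st.2 + 1)) (d, v)).1.getD q 0
        = if q.1 = x + 1 ∧ 1 ≤ q.2 ∧ q.2 ≤ (n : Int) then v + (q.2 - 1) else d.getD q 0
  | 0, d, v => by
    rw [PySem.List.pyRange_one_eq_nil (by omega)]
    refine ⟨by simp, fun q => ?_⟩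
    rw [if_neg (by omega)]
    rfl
  | n + 1, d, v => by
    have hsplit : PySem.List.pyRange 0 ((n + 1 : Nat) : Int) 1
        = PySem.List.pyRange 0 (n : Int) 1 ++ [(n : Int)] := by
      push_cast
      exact PySem.List.pyRange_one_succ_right (by omega)
    obtain ⟨ih2, ih1⟩ := innerB columns x n d v
    rw [hsplit, List.foldl_append]
    refine ⟨by simp only [List.foldl_cons, List.foldl_nil]; simp only [ih2]; push_cast; ring, fun q => ?_⟩
    simp only [List.foldl_cons, List.foldl_nil]
    by_cases hq : q = (x + 1, (n : Int) + 1)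
    · rw [hq]
      rw [PySem.Dict.getD_insert_self, ih2, if_pos (by refine ⟨rfl, by push_cast; omega, ?_⟩; push_cast; omega)]
      push_cast; ring
    · have hne : ¬(q.1 = x + 1 ∧ q.2 = (n : Int) + 1) := by
        intro h; exact hq (Prod.ext_iff.mpr ⟨h.1, h.2⟩)
      rw [PySem.Dict.getD_insert_of_ne _ _ _ hq, ih1 q]
      have hiff : (q.1 = x + 1 ∧ 1 ≤ q.2 ∧ q.2 ≤ (n : Int))
          ↔ (q.1 = x + 1 ∧ 1 ≤ q.2 ∧ q.2 ≤ ((n + 1 : Nat) : Int)) := by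
        push_cast
        push_cast at hne
        omega
      rw [if_congr hiff rfl rfl]

lemma outerB (columns : Int) : ∀ (n : Nat) (d : PySem.Dict (Int × Int) Int) (v : Int),
    ((PySem.List.pyRange 0 (n : Int) 1).foldl
        (fun (st : PySem.Dict (Int × Int) Int × Int) x =>
          (PySem.List.pyRange 0 columns 1).foldl
            (fun st y => (st.1.insert (x + 1, y + 1) st.2, st.2 + 1)) st) (d, v)).2
      = v + (n * columns.toNat : Nat)
    ∧ ∀ q : Int × Int,
      ((PySem.List.pyRange 0 (n : Int) 1).foldl
          (fun (st : PySem.Dict (Int × Int) Int × Int) x =>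
            (PySem.List.pyRange 0 columns 1).foldl
              (fun st y => (st.1.insert (x + 1, y + 1) st.2, st.2 + 1)) st) (d, v)).1.getD q 0
        = if 1 ≤ q.1 ∧ q.1 ≤ (n : Int) ∧ 1 ≤ q.2 ∧ q.2 ≤ columns
            then v + (q.1 - 1) * columns + (q.2 - 1) else d.getD q 0
  | 0, d, v => by
    rw [show PySem.List.pyRange 0 ((0 : Nat) : Int) 1 = [] from
      PySem.List.pyRange_one_eq_nil (by omega)]
    refine ⟨by simp, fun q => ?_⟩
    rw [if_neg (by push_cast; omega)]
    rfl
  | n + 1, d, v => by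
    have hsplit : PySem.List.pyRange 0 ((n + 1 : Nat) : Int) 1
        = PySem.List.pyRange 0 (n : Int) 1 ++ [(n : Int)] := by
      push_cast
      exact PySem.List.pyRange_one_succ_right (by omega)
    obtain ⟨ih2, ih1⟩ := outerB columns n d v
    rw [hsplit, List.foldl_append]
    simp only [List.foldl_cons, List.foldl_nil]
    set S := (PySem.List.pyRange 0 (n : Int) 1).foldl
        (fun (st : PySem.Dict (Int × Int) Int × Int) x =>
          (PySem.List.pyRange 0 columns 1).foldl
            (fun st y => (st.1.insert (x + 1, y + 1) st.2, st.2 + 1)) st) (d, v) with hS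
    have hSe : S = (S.1, S.2) := rfl
    rw [hSe, pyRange_zero_toNat columns]
    obtain ⟨jn2, jn1⟩ := innerB columns (n : Int) columns.toNat S.1 S.2
    constructor
    · rw [jn2, ih2]; push_cast; ring
    · intro q
      rw [jn1 q, ih2]
      by_cases hrow : q.1 = (n : Int) + 1 ∧ 1 ≤ q.2 ∧ q.2 ≤ (columns.toNat : Int)
      · obtain ⟨e1, e2, e3⟩ := hrow
        have hc : 0 ≤ columns := by omega
        rw [if_pos ⟨e1, e2, e3⟩, if_pos (by push_cast at e1 e3 ⊢; omega)]
        rw [e1, show (n : Int) + 1 - 1 = (n : Int) from by ring,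
          show ((n * columns.toNat : Nat) : Int) = (n : Int) * columns from by
            rw [Int.natCast_mul, Int.toNat_of_nonneg hc]]
      · rw [if_neg hrow, ih1 q]
        have hiff : (1 ≤ q.1 ∧ q.1 ≤ (n : Int) ∧ 1 ≤ q.2 ∧ q.2 ≤ columns)
            ↔ (1 ≤ q.1 ∧ q.1 ≤ ((n + 1 : Nat) : Int) ∧ 1 ≤ q.2 ∧ q.2 ≤ columns) := by
          push_cast
          push_cast at hrow
          omega
        rw [if_congr hiff rfl rfl]

lemma build_getD (rows columns : Int) (p : Int × Int) (hp : InRange rows columns p) :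
    (buildMatrix rows columns).getD p 0 = (p.1 - 1) * columns + p.2 := by
  obtain ⟨hp1, hp2, hp3, hp4⟩ := hp
  unfold buildMatrix
  rw [pyRange_zero_toNat rows]
  obtain ⟨_, h1⟩ := outerB columns rows.toNat PySem.Dict.empty 1
  rw [h1 p, if_pos (by omega)]
  ring

lemma grid0_shape (rows columns : Int) :
    GShape rows columns ((PySem.List.pyRange 0 rows 1).map (fun r =>
      (PySem.List.pyRange 0 columns 1).map (fun c => r * columns + c + 1))) := by
  constructor
  · simp [PySem.List.length_pyRange_one]
  · intro row hrow
    obtain ⟨r, _, rfl⟩ := List.mem_map.mp hrow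
    simp [PySem.List.length_pyRange_one]

lemma grid0_get (rows columns : Int) (p : Int × Int) (hp : InRange rows columns p) :
    gridGet ((PySem.List.pyRange 0 rows 1).map (fun r =>
      (PySem.List.pyRange 0 columns 1).map (fun c => r * columns + c + 1))) p
    = (p.1 - 1) * columns + p.2 := by
  obtain ⟨hp1, hp2, hp3, hp4⟩ := hp
  unfold gridGet
  rw [PySem.List.pyGetD_map_pyRange_of_nonneg _ rows (p.1 - 1) [] (by omega) (by omega)]
  rw [PySem.List.pyGetD_map_pyRange_of_nonneg _ columns (p.2 - 1) 0 (by omega) (by omega)]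
  ring

lemma carry_append (d : PySem.Dict (Int × Int) Int) (now mn : Int)
    (l1 l2 : List (Int × Int)) :
    carry d now mn (l1 ++ l2)
      = carry (carry d now mn l1).1 (carry d now mn l1).2.1 (carry d now mn l1).2.2 l2 := by
  simp [carry, List.foldl_append]

lemma nodup_rot (p0 : Int × Int) (t : List (Int × Int)) (h : (p0 :: t).Nodup) :
    (t ++ [p0]).Nodup := by
  rw [List.nodup_cons] at h
  rw [List.nodup_append]
  exact ⟨h.2, List.nodup_singleton _, fun a ha b hb => by
    simp only [List.mem_singleton] at hb
    subst hb
    exact fun e => h.1 (e ▸ ha)⟩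

lemma query_step (rows columns : Int) (q : List Int)
    (d : PySem.Dict (Int × Int) Int) (g : List (List Int)) (now after : Int) (ansA : List Int)
    (hlen : 4 ≤ q.length)
    (hx1 : 1 ≤ q.getD 0 0) (hx : q.getD 0 0 < q.getD 2 0) (hx2 : q.getD 2 0 ≤ rows)
    (hy1 : 1 ≤ q.getD 1 0) (hy : q.getD 1 0 < q.getD 3 0) (hy2 : q.getD 3 0 ≤ columns)
    (hs : GShape rows columns g) (hinv : InvDG rows columns d g) :
    (aQuery (d, now, after, ansA) q).2.2.2 = ansA ++ (bQuery (g, []) q).2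
    ∧ InvDG rows columns (aQuery (d, now, after, ansA) q).1 (bQuery (g, []) q).1
    ∧ GShape rows columns (bQuery (g, []) q).1 := by
  set X1 := q.getD 0 0 with hX1
  set Y1 := q.getD 1 0 with hY1
  set X2 := q.getD 2 0 with hX2
  set Y2 := q.getD 3 0 with hY2
  -- abbreviations
  set T := ringTail X1 Y1 X2 Y2 with hT
  set R := ringL X1 Y1 X2 Y2 with hR
  have hRc : R = (X1, Y1) :: T := ring_cons X1 Y1 X2 Y2 hy
  have hRnd : R.Nodup := ring_nodup X1 Y1 X2 Y2 hx hy
  have hRin : ∀ p ∈ R, InRange rows columns p :=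
    ring_inrange rows columns X1 Y1 X2 Y2 hx1 hx hx2 hy1 hy hy2
  have hQnd : (T ++ [(X1, Y1)]).Nodup := nodup_rot _ _ (hRc ▸ hRnd)
  have hp0T : (X1, Y1) ∉ T := (List.nodup_cons.mp (hRc ▸ hRnd)).1
  set vd := fun p : Int × Int => d.getD p 0 with hvd
  set vals := R.map (fun p => gridGet g p) with hvals
  have hmapv : R.map vd = vals := by
    rw [hvals]
    exact List.map_congr_left (fun p hp => hinv p (hRin p hp))
  have hRne : R ≠ [] := by rw [hRc]; exact List.cons_ne_nil _ _
  have hvne : vals ≠ [] := by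
    rw [hvals]
    exact fun h => hRne (List.map_eq_nil_iff.mp h)
  have hlenTv : T.length = vals.dropLast.length := by
    have : vals.length = R.length := by rw [hvals, List.length_map]
    rw [List.length_dropLast, this, hRc, List.length_cons]
    omega
  -- the value list A threads through its carry is exactly B's `vals`
  have hW : ((vd (X1, Y1)) :: (T ++ [(X1, Y1)]).map vd).take (T ++ [(X1, Y1)]).length
      = vals := by
    rw [List.map_append, List.length_append, List.length_cons, List.length_nil, List.map_cons,
      List.map_nil]
    rw [show T.length + (0 + 1) = T.length + 1 from by omega, List.take_succ_cons]
    rw [show T.length = (T.map vd).length from by simp, List.take_left]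
    rw [← hmapv, hRc, List.map_cons]
  -- A's side: the four loops are one carry over the rotated ring
  obtain ⟨hC1, hC2⟩ := carry_spec (T ++ [(X1, Y1)]) d (vd (X1, Y1)) 1000000 hQnd
  rw [hW] at hC1 hC2
  have hA : (aQuery (d, now, after, ansA) q).1
        = (carry d (vd (X1, Y1)) 1000000 (T ++ [(X1, Y1)])).1
      ∧ (aQuery (d, now, after, ansA) q).2.2.2
        = ansA ++ [(carry d (vd (X1, Y1)) 1000000 (T ++ [(X1, Y1)])).2.2] := by
    simp only [aQuery, PySem.List.pyGetD_ofNat', ← hX1, ← hY1, ← hX2, ← hY2]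
    rw [foldl_aBody1 X1 Y1 Y2 hy d now after 1000000]
    rw [foldl_aBody (fun y => (X1, y + 1)), foldl_aBody (fun x => (x + 1, Y2)),
      foldl_aBody (fun y => (X2, y - 1)), foldl_aBody (fun x => (x - 1, Y1))]
    rw [← carry_append, ← carry_append, ← carry_append]
    rw [q_eq_ringTail X1 Y1 X2 Y2 hx hy]
    exact ⟨rfl, rfl⟩
  -- B's side
  have hfoldR : (PySem.List.pyRange Y1 (Y2 + 1) 1).map (fun y => (X1, y))
      ++ (PySem.List.pyRange (X1 + 1) (X2 + 1) 1).map (fun x => (x, Y2))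
      ++ (PySem.List.pyRange (Y2 - 1) (Y1 - 1) (-1)).map (fun y => (X2, y))
      ++ (PySem.List.pyRange (X2 - 1) X1 (-1)).map (fun x => (x, Y1)) = R := by
    rw [hR]; rfl
  have hB : bQuery (g, []) q
      = (wbG g (R.zip (vals.getLast hvne :: vals.dropLast)),
         [(PySem.List.min? ((1000000 : Int) :: vals) (fun x => x)).getD 0]) := by
    simp only [bQuery, PySem.List.pyGetD_ofNat', ← hX1, ← hY1, ← hX2, ← hY2]
    rw [hfoldR, ← hvals]
    rw [PySem.List.pyGetD_neg_one _ _ hvne, PySem.List.slice_to_neg_one]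
    rfl
  -- the two writebacks agree pointwise, and the two mins agree
  have hzipA : (T ++ [(X1, Y1)]).zip vals
      = T.zip vals.dropLast ++ [((X1, Y1), vals.getLast hvne)] := by
    conv_lhs => rw [← List.dropLast_concat_getLast hvne]
    rw [List.zip_append hlenTv]
    rfl
  have hzipB : R.zip (vals.getLast hvne :: vals.dropLast)
      = ((X1, Y1), vals.getLast hvne) :: T.zip vals.dropLast := by
    rw [hRc]
    rfl
  have hfstA : ((T ++ [(X1, Y1)]).zip vals).map Prod.fst = T ++ [(X1, Y1)] := by
    refine List.map_fst_zip ?_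
    have : vals.length = R.length := by rw [hvals, List.length_map]
    rw [this, hRc]
    simp
  have hfstB : ((R.zip (vals.getLast hvne :: vals.dropLast))).map Prod.fst = R := by
    refine List.map_fst_zip ?_
    have : vals.length = R.length := by rw [hvals, List.length_map]
    rw [List.length_cons, List.length_dropLast, this, hRc]
    simp
  have hlk : ∀ pq, ((T ++ [(X1, Y1)]).zip vals).lookup pq
      = (R.zip (vals.getLast hvne :: vals.dropLast)).lookup pq := by
    intro pq
    rw [hzipA, hzipB]
    refine lookup_rotate _ _ ?_ pq
    have : (T.zip vals.dropLast).map Prod.fst = T :=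
      List.map_fst_zip (by rw [← hlenTv])
    rw [this]
    exact hp0T
  have hmin : (carry d (vd (X1, Y1)) 1000000 (T ++ [(X1, Y1)])).2.2
      = (PySem.List.min? ((1000000 : Int) :: vals) (fun x => x)).getD 0 := by
    rw [hC2, PySem.List.min?_id_cons]
    rfl
  refine ⟨?_, ?_, ?_⟩
  · rw [hA.2, hB, hmin]
  · intro pq hpq
    rw [hA.1, hB, hC1]
    rw [wb_getD _ _ (by rw [hfstA]; exact hQnd) pq]
    rw [wbG_getD rows columns _ _ hs (by rw [hfstB]; exact hRin) (by rw [hfstB]; exact hRnd) pq hpq]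
    rw [hlk pq, hinv pq hpq]
  · rw [hB]
    exact wbG_shape rows columns _ _ hs (by rw [hfstB]; exact hRin)

lemma bQuery_split (g : List (List Int)) (ans : List Int) (q : List Int) :
    bQuery (g, ans) q = ((bQuery (g, []) q).1, ans ++ (bQuery (g, []) q).2) := by
  simp [bQuery]

lemma fold_eq (rows columns : Int) : ∀ (queries : List (List Int))
    (d : PySem.Dict (Int × Int) Int) (g : List (List Int)) (now after : Int) (ans : List Int),
    (∀ q ∈ queries, 4 ≤ q.length ∧
      1 ≤ q.getD 0 0 ∧ q.getD 0 0 < q.getD 2 0 ∧ q.getD 2 0 ≤ rows ∧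
      1 ≤ q.getD 1 0 ∧ q.getD 1 0 < q.getD 3 0 ∧ q.getD 3 0 ≤ columns) →
    InvDG rows columns d g → GShape rows columns g →
    (queries.foldl aQuery (d, now, after, ans)).2.2.2 = (queries.foldl bQuery (g, ans)).2
  | [], d, g, now, after, ans, _, _, _ => rfl
  | q :: t, d, g, now, after, ans, hpre, hinv, hshape => by
    have hq := hpre q (List.mem_cons_self)
    obtain ⟨h1, h2, h3⟩ := query_step rows columns q d g now after ans hq.1 hq.2.1 hq.2.2.1
      hq.2.2.2.1 hq.2.2.2.2.1 hq.2.2.2.2.2.1 hq.2.2.2.2.2.2 hshape hinv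
    simp only [List.foldl_cons]
    rw [bQuery_split g ans q, ← h1]
    exact fold_eq rows columns t (aQuery (d, now, after, ans) q).1 (bQuery (g, []) q).1
      (aQuery (d, now, after, ans) q).2.1 (aQuery (d, now, after, ans) q).2.2.1
      (aQuery (d, now, after, ans) q).2.2.2
      (fun q' hq' => hpre q' (List.mem_cons_of_mem _ hq')) h2 h3

-- ===== VERDICT (by name: the statement is the Claim_ definition above) =====
theorem solution_spec : Claim_equal_solution := by
  intro rows columns queries _ hpre
  unfold Spec_solution solution solution_alt
  refine fold_eq rows columns queries _ _ 0 0 [] hpre ?_ (grid0_shape rows columns)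
  intro p hp
  rw [build_getD rows columns p hp, grid0_get rows columns p hp]
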